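-- pv_equiv track=rewrite | github.com/xiaohu2206/superAIAutoCutVideo | backend/services/reference_copywriting_wash/splitter.py | split_subs_text_by_sections
-- ===== SOURCE A (Python) =====
-- from typing import List, Tuple
--
-- def split_subs_text_by_sections(subs_text: str, n: int) -> List[str]:
--     if n <= 0:
--         return []
--     lines = subs_text.split("\n")
--     if n == 1:
--         return [subs_text]
--     out: List[str] = []
--     for i in range(n):
--         lo = i * len(lines) // n
--         hi = (i + 1) * len(lines) // n if i < n - 1 else len(lines)
--         out.append("\n".join(lines[lo:hi]))
--     return out
-- ===== SOURCE B (Python) =====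
-- from typing import List
--
--
-- def split_subs_text_by_sections(subs_text: str, n: int) -> List[str]:
--     if n <= 0:
--         return []
--     if n == 1:
--         return [subs_text]
--     lines = subs_text.split("\n")
--     total = len(lines)
--     sections: List[str] = []
--     rest = lines
--     for i in range(1, n + 1):
--         cnt = i * total // n - (i - 1) * total // n
--         sections.append("\n".join(rest[:cnt]))
--         rest = rest[cnt:]
--     return sections
-- ===== Notes on version B (the rewrite author's own statement) =====
-- stated objective: alternative
-- what changed: A slices each of the n sections out of the full line list by absolute boundary indices i*len//n; B streams: it derives each section's line count from consecutive boundary differences and peels that many lines off the front of a shrinking remainder, never indexing into the original list.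
import Mathlib
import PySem

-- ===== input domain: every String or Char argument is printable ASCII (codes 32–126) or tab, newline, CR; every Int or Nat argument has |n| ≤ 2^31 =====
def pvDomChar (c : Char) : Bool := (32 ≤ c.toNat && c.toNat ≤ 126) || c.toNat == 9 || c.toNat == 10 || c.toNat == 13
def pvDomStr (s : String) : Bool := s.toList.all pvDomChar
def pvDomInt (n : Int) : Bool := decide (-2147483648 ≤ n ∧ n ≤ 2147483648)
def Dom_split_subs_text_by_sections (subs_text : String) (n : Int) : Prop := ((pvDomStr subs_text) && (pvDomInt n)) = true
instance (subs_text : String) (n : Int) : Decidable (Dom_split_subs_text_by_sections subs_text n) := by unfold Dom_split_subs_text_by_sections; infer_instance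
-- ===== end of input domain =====

-- B replaces A's absolute index slices lines[i*len//n : (i+1)*len//n] by a streaming pass that
-- peels each section's line count off the front of a shrinking remainder (objective: alternative).

-- ===== PORT A =====
-- Python's s.split("\n") never raises for the non-empty literal separator, so split? is `some` here.
def split_subs_text_by_sections (subs_text : String) (n : Int) : List String :=
  if n ≤ 0 then []
  else
    let lines := (PySem.Str.split? subs_text "\n").getD []
    if n = 1 then [subs_text]
    else
      (PySem.List.pyRange 0 n 1).foldl (fun out i =>
        let lo := PySem.Int.floordiv (i * (lines.length : Int)) n
        let hi := if i < n - 1 then PySem.Int.floordiv ((i + 1) * (lines.length : Int)) n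
                  else (lines.length : Int)
        out ++ [PySem.Str.join "\n" (PySem.List.slice lines (some lo) (some hi))]) []

-- ===== PORT B =====
def split_subs_text_by_sections_alt (subs_text : String) (n : Int) : List String :=
  if n ≤ 0 then []
  else if n = 1 then [subs_text]
  else
    let lines := (PySem.Str.split? subs_text "\n").getD []
    let total : Int := (lines.length : Int)
    ((PySem.List.pyRange 1 (n + 1) 1).foldl (fun (st : List String × List String) i =>
        let cnt := PySem.Int.floordiv (i * total) n - PySem.Int.floordiv ((i - 1) * total) n
        (st.1 ++ [PySem.Str.join "\n" (PySem.List.slice st.2 none (some cnt))],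
         PySem.List.slice st.2 (some cnt) none)) ([], lines)).1

-- ===== PRECONDITION & SPEC =====
def Spec_split_subs_text_by_sections (subs_text : String) (n : Int) (out : List String) : Prop := out = split_subs_text_by_sections_alt subs_text n
instance (subs_text : String) (n : Int) (out : List String) : Decidable (Spec_split_subs_text_by_sections subs_text n out) := by unfold Spec_split_subs_text_by_sections; infer_instance

-- ===== CLAIM (what is proved, stated in full; the proofs are below) =====
def Claim_equal_split_subs_text_by_sections : Prop := ∀ (subs_text : String) (n : Int), Dom_split_subs_text_by_sections subs_text n → Spec_split_subs_text_by_sections subs_text n (split_subs_text_by_sections subs_text n)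

-- ===== LEMMAS AND PROOFS =====

theorem pv_fd_nonneg (a n : Int) (ha : 0 ≤ a) (hn : 0 < n) : 0 ≤ PySem.Int.floordiv a n := by
  rw [PySem.Int.floordiv_eq_ediv_of_pos hn]
  exact Int.ediv_nonneg ha (le_of_lt hn)

theorem pv_fd_mono (a b n : Int) (h : a ≤ b) (hn : 0 < n) :
    PySem.Int.floordiv a n ≤ PySem.Int.floordiv b n := by
  rw [PySem.Int.floordiv_eq_ediv_of_pos hn, PySem.Int.floordiv_eq_ediv_of_pos hn]
  exact Int.ediv_le_ediv hn h

theorem pv_fd_top (L n : Int) (hn : 0 < n) : PySem.Int.floordiv (n * L) n = L := by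
  rw [PySem.Int.floordiv_eq_ediv_of_pos hn]
  exact Int.mul_ediv_cancel_left L hn.ne'

theorem pv_fd_zero (n : Int) (hn : 0 < n) : PySem.Int.floordiv 0 n = 0 := by
  rw [PySem.Int.floordiv_eq_ediv_of_pos hn]
  exact Int.zero_ediv n

-- loop invariant of B's fold: the remainder is always a suffix lines.drop (((a-1)*L)//n)
theorem pv_bloop (n : Int) (hn : 0 < n) (lines : List String) :
    ∀ (k : Nat) (a : Int) (acc : List String), n + 1 - a = (k : Int) → 1 ≤ a →
    ((PySem.List.pyRange a (n + 1) 1).foldl (fun (st : List String × List String) i =>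
        let cnt := PySem.Int.floordiv (i * (lines.length : Int)) n -
                   PySem.Int.floordiv ((i - 1) * (lines.length : Int)) n
        (st.1 ++ [PySem.Str.join "\n" (PySem.List.slice st.2 none (some cnt))],
         PySem.List.slice st.2 (some cnt) none))
      (acc, lines.drop (PySem.Int.floordiv ((a - 1) * (lines.length : Int)) n).toNat)).1
    = acc ++ (PySem.List.pyRange a (n + 1) 1).map (fun i =>
        PySem.Str.join "\n"
          ((lines.drop (PySem.Int.floordiv ((i - 1) * (lines.length : Int)) n).toNat).take
            ((PySem.Int.floordiv (i * (lines.length : Int)) n).toNat -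
             (PySem.Int.floordiv ((i - 1) * (lines.length : Int)) n).toNat))) := by
  intro k
  induction k with
  | zero =>
    intro a acc hk ha
    rw [PySem.List.pyRange_one_eq_nil (by omega)]
    simp
  | succ k ih =>
    intro a acc hk ha
    have hlt : a < n + 1 := by omega
    rw [PySem.List.pyRange_one_cons hlt]
    have hL : (0 : Int) ≤ (lines.length : Int) := Int.natCast_nonneg _
    have hmono : PySem.Int.floordiv ((a - 1) * (lines.length : Int)) n ≤
        PySem.Int.floordiv (a * (lines.length : Int)) n :=
      pv_fd_mono _ _ _ (by nlinarith) hn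
    have hp : 0 ≤ PySem.Int.floordiv ((a - 1) * (lines.length : Int)) n :=
      pv_fd_nonneg _ _ (by nlinarith) hn
    have hcnt : 0 ≤ PySem.Int.floordiv (a * (lines.length : Int)) n -
        PySem.Int.floordiv ((a - 1) * (lines.length : Int)) n := by omega
    simp only [List.foldl_cons, List.map_cons]
    rw [PySem.List.slice_to _ hcnt, PySem.List.slice_from _ hcnt, List.drop_drop]
    have htk : (PySem.Int.floordiv (a * (lines.length : Int)) n -
        PySem.Int.floordiv ((a - 1) * (lines.length : Int)) n).toNat =
        (PySem.Int.floordiv (a * (lines.length : Int)) n).toNat -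
        (PySem.Int.floordiv ((a - 1) * (lines.length : Int)) n).toNat := by omega
    have hdr : (PySem.Int.floordiv ((a - 1) * (lines.length : Int)) n).toNat +
        ((PySem.Int.floordiv (a * (lines.length : Int)) n).toNat -
         (PySem.Int.floordiv ((a - 1) * (lines.length : Int)) n).toNat) =
        (PySem.Int.floordiv (a * (lines.length : Int)) n).toNat := by omega
    rw [htk]
    rw [hdr]
    have := ih (a + 1) (acc ++ [PySem.Str.join "\n"
        ((lines.drop (PySem.Int.floordiv ((a - 1) * (lines.length : Int)) n).toNat).take
          ((PySem.Int.floordiv (a * (lines.length : Int)) n).toNat -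
           (PySem.Int.floordiv ((a - 1) * (lines.length : Int)) n).toNat))]) (by omega) (by omega)
    rw [show a + 1 - 1 = a by ring] at this
    rw [this, List.append_assoc, List.singleton_append]

-- ===== VERDICT (by name: the statement is the Claim_ definition above) =====
theorem split_subs_text_by_sections_spec : Claim_equal_split_subs_text_by_sections := by
  intro subs_text n _
  unfold Spec_split_subs_text_by_sections
  unfold split_subs_text_by_sections split_subs_text_by_sections_alt
  by_cases h0 : n ≤ 0
  · simp [h0]
  · simp only [if_neg h0]
    by_cases h1 : n = 1
    · simp [h1]
    · simp only [if_neg h1]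
      have hn : 0 < n := by omega
      set lines := (PySem.Str.split? subs_text "\n").getD [] with hl
      -- B side
      have hstart : lines = lines.drop (PySem.Int.floordiv ((1 - 1) * (lines.length : Int)) n).toNat := by
        norm_num [pv_fd_zero n hn]
      have hB := pv_bloop n hn lines (n.toNat) 1 [] (by omega) (by omega)
      rw [← hstart] at hB
      rw [hB]
      -- A side
      rw [PySem.List.foldl_append_singleton_eq_map]
      simp only [List.nil_append]
      rw [PySem.List.pyRange_one 0 n, PySem.List.pyRange_one 1 (n + 1)]
      rw [show n - 0 = n by ring, show n + 1 - 1 = n by ring]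
      rw [List.map_map, List.map_map]
      apply List.map_congr_left
      intro k hk
      have hk' : (k : Int) < n := by
        have := List.mem_range.mp hk
        omega
      simp only [Function.comp_apply, zero_add]
      have hlo : 0 ≤ PySem.Int.floordiv ((k : Int) * (lines.length : Int)) n :=
        pv_fd_nonneg _ _ (by positivity) hn
      have hsh : ((1 : Int) + (k : Int)) - 1 = (k : Int) := by ring
      by_cases hlast : (k : Int) < n - 1
      · rw [if_pos hlast]
        have hhi : 0 ≤ PySem.Int.floordiv (((k : Int) + 1) * (lines.length : Int)) n :=
          pv_fd_nonneg _ _ (by positivity) hn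
        rw [PySem.List.slice_toNat _ hlo hhi]
        rw [hsh, show (1 : Int) + (k : Int) = (k : Int) + 1 by ring]
      · rw [if_neg hlast]
        rw [PySem.List.slice_toNat _ hlo (Int.natCast_nonneg _)]
        rw [hsh, show (1 : Int) + (k : Int) = n by omega, pv_fd_top _ _ hn]
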